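-- pv_equiv track=rewrite | github.com/LorenzoLongaretto/Henry_challenge | checkpoint.py | trianguloRectangulo
-- ===== SOURCE A (Python) =====
-- def trianguloRectangulo(a,b,c):
--    '''
--    La función debe recibir como argumentos el valor en cm de los lados de un triángulo (a y b son los catetos), y dado estos valores, retornar True si en efecto corresponden a un triángulo rectángulo, o False en caso contrario. Sólo se debe poder pasar valores enteros como argumentos de la función, caso contrario debe retornar nulo.
--    EJ: trianguloRectangulo(3.5,3.5,2.4), debe retornar nulo
--    EJ: trianguloRectangulo(3,3,3), debe retornar False
--    EJ: trianguloRectangulo(3,4,5), debe retornar True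
--    '''
--    #Tu código acá
--    if not all(isinstance(valor, int) for valor in [a, b, c]):
--         return None
--
--    lados = [a, b, c]
--    lados.sort()
--
--    if lados[0] <= 0 or lados[0] + lados[1] <= lados[2]:
--         return False
--
--    if lados[0] ** 2 + lados[1] ** 2 == lados[2] ** 2:
--         return True
--
--    return False
-- ===== SOURCE B (Python) =====
-- def trianguloRectangulo(a, b, c):
--     '''Right-triangle test without sorting: guard non-ints, reject non-positive
--     sides, then test each side as the possible hypotenuse.'''
--     if not all(isinstance(valor, int) for valor in [a, b, c]):
--         return None
--     if a <= 0 or b <= 0 or c <= 0: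
--         return False
--     return a*a + b*b == c*c or a*a + c*c == b*b or b*b + c*c == a*a
-- ===== Notes on version B (the rewrite author's own statement) =====
-- stated objective: simpler
-- what changed: B drops the sort and the triangle-inequality guard entirely: after the same int-type guard it rejects any non-positive side and returns the three-way Pythagorean disjunction testing each side as hypotenuse (the inequality guard is provably redundant when Pythagoras holds among positive sides).
import Mathlib
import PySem

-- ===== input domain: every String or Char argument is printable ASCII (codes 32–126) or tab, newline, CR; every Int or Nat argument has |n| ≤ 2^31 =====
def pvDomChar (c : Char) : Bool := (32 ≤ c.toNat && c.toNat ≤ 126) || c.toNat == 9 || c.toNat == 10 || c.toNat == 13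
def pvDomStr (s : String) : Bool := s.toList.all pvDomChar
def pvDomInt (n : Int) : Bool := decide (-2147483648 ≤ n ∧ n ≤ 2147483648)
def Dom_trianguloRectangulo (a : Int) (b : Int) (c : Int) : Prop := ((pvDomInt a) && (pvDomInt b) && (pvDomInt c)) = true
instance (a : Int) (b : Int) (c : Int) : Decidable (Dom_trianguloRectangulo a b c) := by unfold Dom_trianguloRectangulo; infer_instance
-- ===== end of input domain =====

-- B replaces A's sort-then-triangle-inequality check by a direct three-way Pythagorean
-- disjunction over positive sides (simpler; the inequality guard is redundant there).

-- ===== PORT A =====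
-- The isinstance-int guard always passes under the Int signature (return None is unreachable).
def trianguloRectangulo (a : Int) (b : Int) (c : Int) : Option Bool :=
  let lados := PySem.List.sorted [a, b, c] (fun x => x) false
  match PySem.List.pyGet? lados 0, PySem.List.pyGet? lados 1, PySem.List.pyGet? lados 2 with
  | some l0, some l1, some l2 =>
      if l0 ≤ 0 ∨ l0 + l1 ≤ l2 then some false
      else if l0 ^ 2 + l1 ^ 2 = l2 ^ 2 then some true
      else some false
  | _, _, _ => none   -- unreachable: the sorted 3-list has length 3

-- ===== PORT B =====
def trianguloRectangulo_alt (a : Int) (b : Int) (c : Int) : Option Bool :=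
  if a ≤ 0 ∨ b ≤ 0 ∨ c ≤ 0 then some false
  else some (decide (a*a + b*b = c*c) || decide (a*a + c*c = b*b) || decide (b*b + c*c = a*a))

-- ===== PRECONDITION & SPEC =====
def Spec_trianguloRectangulo (a : Int) (b : Int) (c : Int) (out : Option Bool) : Prop := out = trianguloRectangulo_alt a b c
instance (a : Int) (b : Int) (c : Int) (out : Option Bool) : Decidable (Spec_trianguloRectangulo a b c out) := by unfold Spec_trianguloRectangulo; infer_instance

-- ===== CLAIM (what is proved, stated in full; the proofs are below) =====
def Claim_equal_trianguloRectangulo : Prop := ∀ (a : Int) (b : Int) (c : Int), Dom_trianguloRectangulo a b c → Spec_trianguloRectangulo a b c (trianguloRectangulo a b c)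

-- ===== LEMMAS AND PROOFS =====

-- A's branch structure, evaluated on a sorted triple x ≤ y ≤ z, agrees with B on that triple.
lemma A_sorted_eval (x y z : Int) (hxy : x ≤ y) (hyz : y ≤ z) :
    ((if x ≤ 0 ∨ x + y ≤ z then some false
      else if x ^ 2 + y ^ 2 = z ^ 2 then some true else some false) : Option Bool)
    = trianguloRectangulo_alt x y z := by
  unfold trianguloRectangulo_alt
  by_cases h : x ≤ 0 ∨ x + y ≤ z
  · rcases h with h | h
    · simp [h]
    · by_cases hx : x ≤ 0
      · simp [hx]
      · have hx' : 0 < x := by omega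
        have hd1 : ¬ (x*x + y*y = z*z) := by nlinarith
        have hd2 : ¬ (x*x + z*z = y*y) := by nlinarith
        have hd3 : ¬ (y*y + z*z = x*x) := by nlinarith
        simp [h, hd1, hd2, hd3, not_le.mpr hx']
  · have hx : 0 < x := by omega
    have hz : z < x + y := by omega
    have hcond : ¬ (x ≤ 0 ∨ y ≤ 0 ∨ z ≤ 0) := by omega
    by_cases hp : x ^ 2 + y ^ 2 = z ^ 2
    · have hd1 : x*x + y*y = z*z := by nlinarith [hp]
      simp [h, hp, hcond, hd1]
    · have hd1 : ¬ (x*x + y*y = z*z) := by intro h'; exact hp (by nlinarith)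
      have hd2 : ¬ (x*x + z*z = y*y) := by nlinarith
      have hd3 : ¬ (y*y + z*z = x*x) := by nlinarith
      simp [h, hp, hcond, hd1, hd2, hd3]

-- B is symmetric in its three arguments (both the guard and the disjunction are).
lemma alt_swap12 (a b c : Int) : trianguloRectangulo_alt a b c = trianguloRectangulo_alt b a c := by
  unfold trianguloRectangulo_alt
  have h1 : (a ≤ 0 ∨ b ≤ 0 ∨ c ≤ 0) ↔ (b ≤ 0 ∨ a ≤ 0 ∨ c ≤ 0) := by tauto
  have e1 : (a*a + b*b = c*c) ↔ (b*b + a*a = c*c) := by constructor <;> intro h <;> linarith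
  by_cases h : a ≤ 0 ∨ b ≤ 0 ∨ c ≤ 0
  · simp [h, h1.mp h]
  · simp only [if_neg h, if_neg (h1.not.mp h)]
    rw [decide_eq_decide.mpr e1, Bool.or_assoc, Bool.or_comm (decide (a*a + c*c = b*b)),
      ← Bool.or_assoc]

lemma alt_swap23 (a b c : Int) : trianguloRectangulo_alt a b c = trianguloRectangulo_alt a c b := by
  unfold trianguloRectangulo_alt
  have h1 : (a ≤ 0 ∨ b ≤ 0 ∨ c ≤ 0) ↔ (a ≤ 0 ∨ c ≤ 0 ∨ b ≤ 0) := by tauto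
  have e3 : (b*b + c*c = a*a) ↔ (c*c + b*b = a*a) := by constructor <;> intro h <;> linarith
  by_cases h : a ≤ 0 ∨ b ≤ 0 ∨ c ≤ 0
  · simp [h, h1.mp h]
  · simp only [if_neg h, if_neg (h1.not.mp h)]
    rw [decide_eq_decide.mpr e3, Bool.or_comm (decide (a*a + b*b = c*c))]

-- A evaluated when the sorted list is a known triple [x, y, z].
lemma A_reduce (a b c x y z : Int)
    (hs : PySem.List.sorted [a, b, c] (fun v => v) false = [x, y, z]) :
    trianguloRectangulo a b c
      = (if x ≤ 0 ∨ x + y ≤ z then some false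
         else if x ^ 2 + y ^ 2 = z ^ 2 then some true else some false) := by
  unfold trianguloRectangulo
  rw [hs]
  rfl

-- A on any triple equals B, via the sorted rearrangement and B's symmetry.
lemma A_eq_alt (a b c : Int) : trianguloRectangulo a b c = trianguloRectangulo_alt a b c := by
  rcases le_total a b with hab | hab <;> rcases le_total b c with hbc | hbc <;>
    rcases le_total a c with hac | hac
  · -- a ≤ b ≤ c
    rw [A_reduce a b c a b c (PySem.List.sorted_id_eq_of_perm_of_pairwise _ _
        (List.Perm.refl _) (by simp [List.pairwise_cons] <;> omega))]
    exact A_sorted_eval a b c hab hbc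
  · -- a ≤ b, b ≤ c, c ≤ a : all equal
    rw [A_reduce a b c a b c (PySem.List.sorted_id_eq_of_perm_of_pairwise _ _
        (List.Perm.refl _) (by simp [List.pairwise_cons] <;> omega))]
    exact A_sorted_eval a b c hab hbc
  · -- a ≤ c ≤ b
    rw [A_reduce a b c a c b (PySem.List.sorted_id_eq_of_perm_of_pairwise _ _
        ((List.Perm.swap b c []).cons a) (by simp [List.pairwise_cons] <;> omega))]
    exact (A_sorted_eval a c b hac hbc).trans (alt_swap23 a b c).symm
  · -- c ≤ a ≤ b
    rw [A_reduce a b c c a b (PySem.List.sorted_id_eq_of_perm_of_pairwise _ _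
        ((List.Perm.swap a c [b]).trans ((List.Perm.swap b c []).cons a))
        (by simp [List.pairwise_cons] <;> omega))]
    refine (A_sorted_eval c a b hac hab).trans ?_
    exact ((alt_swap23 a b c).trans (alt_swap12 a c b)).symm
  · -- b ≤ a ≤ c
    rw [A_reduce a b c b a c (PySem.List.sorted_id_eq_of_perm_of_pairwise _ _
        (List.Perm.swap a b [c]) (by simp [List.pairwise_cons] <;> omega))]
    exact (A_sorted_eval b a c hab hac).trans (alt_swap12 a b c).symm
  · -- b ≤ c ≤ a
    rw [A_reduce a b c b c a (PySem.List.sorted_id_eq_of_perm_of_pairwise _ _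
        (((List.Perm.swap a c []).cons b).trans (List.Perm.swap a b [c]))
        (by simp [List.pairwise_cons] <;> omega))]
    refine (A_sorted_eval b c a hbc hac).trans ?_
    exact ((alt_swap12 a b c).trans (alt_swap23 b a c)).symm
  · -- c ≤ b ≤ a, a ≤ c : all equal
    rw [A_reduce a b c b a c (PySem.List.sorted_id_eq_of_perm_of_pairwise _ _
        (List.Perm.swap a b [c]) (by simp [List.pairwise_cons] <;> omega))]
    exact (A_sorted_eval b a c hab hac).trans (alt_swap12 a b c).symm
  · -- c ≤ b ≤ a
    rw [A_reduce a b c c b a (PySem.List.sorted_id_eq_of_perm_of_pairwise _ _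
        ((List.Perm.swap b c [a]).trans (((List.Perm.swap a c []).cons b).trans
          (List.Perm.swap a b [c]))) (by simp [List.pairwise_cons] <;> omega))]
    refine (A_sorted_eval c b a hbc hab).trans ?_
    exact ((alt_swap12 a b c).trans ((alt_swap23 b a c).trans (alt_swap12 b c a))).symm

-- ===== VERDICT (by name: the statement is the Claim_ definition above) =====
theorem trianguloRectangulo_spec : Claim_equal_trianguloRectangulo := by
  intro a b c _
  unfold Spec_trianguloRectangulo
  exact A_eq_alt a b c
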